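-- pv_equiv track=rewrite | github.com/greb/aoc2015 | days/day8.py | count_escape
-- ===== SOURCE A (Python) =====
-- def count_escape(s):
--     cnt = 0
--     for c in s:
--         if c in '\\"':
--             cnt += 2
--         else:
--             cnt += 1
--     return cnt + 2
-- ===== SOURCE B (Python) =====
-- def count_escape(s):
--     return len(s) + 2 + s.count('\\') + s.count('"')
-- ===== Notes on version B (the rewrite author's own statement) =====
-- stated objective: faster
-- what changed: Replaces the per-character branching loop with a closed form: the string's length plus two plus the counts of the two escaped characters obtained via str.count.
import Mathlib
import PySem

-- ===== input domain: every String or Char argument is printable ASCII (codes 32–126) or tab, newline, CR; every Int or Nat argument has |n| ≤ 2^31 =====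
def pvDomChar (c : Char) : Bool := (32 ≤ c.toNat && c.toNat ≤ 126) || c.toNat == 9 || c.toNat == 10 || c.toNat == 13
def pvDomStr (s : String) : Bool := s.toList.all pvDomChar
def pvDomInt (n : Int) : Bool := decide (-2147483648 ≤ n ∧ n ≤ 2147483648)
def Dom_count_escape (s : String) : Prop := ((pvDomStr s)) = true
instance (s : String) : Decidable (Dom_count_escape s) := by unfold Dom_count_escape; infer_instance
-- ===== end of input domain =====

-- B replaces A's per-character branching loop with a closed form: length + 2 + counts of the two escaped characters (measured faster by a constant factor).


-- ===== PORT A =====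
-- loop 'for c in s: cnt += 2 if c in '\"' else 1', then + 2
def count_escape (s : String) : Int :=
  (s.toList.foldl (fun cnt c => if c == '\\' || c == '"' then cnt + 2 else cnt + 1) 0) + 2

-- ===== PORT B =====
def count_escape_alt (s : String) : Int :=
  (PySem.Str.len s : Int) + 2 + (PySem.Str.count s "\\" : Int) + (PySem.Str.count s "\"" : Int)

-- ===== PRECONDITION & SPEC =====
def Spec_count_escape (s : String) (out : Int) : Prop := out = count_escape_alt s
instance (s : String) (out : Int) : Decidable (Spec_count_escape s out) := by unfold Spec_count_escape; infer_instance

-- ===== CLAIM (what is proved, stated in full; the proofs are below) =====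
def Claim_equal_count_escape : Prop := ∀ (s : String), Dom_count_escape s → Spec_count_escape s (count_escape s)

-- ===== LEMMAS AND PROOFS =====

-- Python's str.count with a single-character needle is List.count on the code points.
theorem chars_count_go_singleton (c : Char) (l : List Char) (fuel acc : Nat)
    (h : l.length ≤ fuel) :
    PySem.Chars.count.go [c] fuel l acc = acc + l.count c := by
  induction l generalizing fuel acc with
  | nil => cases fuel <;> simp [PySem.Chars.count.go]
  | cons x t ih =>
    cases fuel with
    | zero => simp at h
    | succ n =>
      simp only [List.length_cons, Nat.succ_le_succ_iff] at h
      by_cases hx : x = c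
      · subst hx
        simp [PySem.Chars.count.go, List.isPrefixOf, ih n (acc + 1) h]
        omega
      · simp [PySem.Chars.count.go, List.isPrefixOf, hx, ih n acc h,
          (by simpa using Ne.symm hx : ¬ (c == x) = true)]

theorem chars_count_singleton (c : Char) (l : List Char) :
    PySem.Chars.count l [c] = l.count c := by
  simp [PySem.Chars.count, chars_count_go_singleton c l l.length 0 le_rfl]

theorem foldl_escape (l : List Char) (a : Int) :
    l.foldl (fun cnt c => if c == '\\' || c == '"' then cnt + 2 else cnt + 1) a
      = a + l.length + l.count '\\' + l.count '"' := by
  induction l generalizing a with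
  | nil => simp
  | cons x t ih =>
    rw [List.foldl_cons, ih]
    by_cases h1 : x = '\\'
    · subst h1; simp; ring
    · by_cases h2 : x = '"'
      · subst h2; simp [h1]; ring
      · simp [h1, h2]; ring

-- ===== VERDICT (by name: the statement is the Claim_ definition above) =====
theorem count_escape_spec : Claim_equal_count_escape := by
  intro s _
  unfold Spec_count_escape count_escape count_escape_alt
  simp only [PySem.Str.count_eq, PySem.Str.len_eq]
  have h1 : ("\\" : String).toList = ['\\'] := rfl
  have h2 : ("\"" : String).toList = ['"'] := rfl
  rw [h1, h2, chars_count_singleton, chars_count_singleton, foldl_escape]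
  ring
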